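-- pv_equiv track=rewrite | github.com/KalcMatej99/aoc2023 | 6/a.py | e_bis
-- ===== SOURCE A (Python) =====
-- def e_bis(s:int, speed:int, time:int, distance:int):
--     if s == speed:
--         return s
--     done_distance = (time - speed) * speed
--
--     if done_distance > distance:
--         mv = e_bis(speed, speed + int((speed - s)/2), time, distance)
--     else:
--         mv = e_bis(s, s + int((speed - s)/2), time, distance)
--
--     return max([speed, mv])
-- ===== SOURCE B (Python) =====
-- def e_bis(s: int, speed: int, time: int, distance: int):
--     best = None
--     while s != speed:
--         best = speed if best is None else max(best, speed)
--         half = int((speed - s) / 2)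
--         if (time - speed) * speed > distance:
--             s, speed = speed, speed + half
--         else:
--             speed = s + half
--     return s if best is None else max(best, s)
-- ===== Notes on version B (the rewrite author's own statement) =====
-- stated objective: alternative
-- what changed: Replaced the single-chain recursion (whose result is folded with max on the way back up) with an explicit iterative loop maintaining a running maximum accumulator, returning when the bounds meet.
import Mathlib
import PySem

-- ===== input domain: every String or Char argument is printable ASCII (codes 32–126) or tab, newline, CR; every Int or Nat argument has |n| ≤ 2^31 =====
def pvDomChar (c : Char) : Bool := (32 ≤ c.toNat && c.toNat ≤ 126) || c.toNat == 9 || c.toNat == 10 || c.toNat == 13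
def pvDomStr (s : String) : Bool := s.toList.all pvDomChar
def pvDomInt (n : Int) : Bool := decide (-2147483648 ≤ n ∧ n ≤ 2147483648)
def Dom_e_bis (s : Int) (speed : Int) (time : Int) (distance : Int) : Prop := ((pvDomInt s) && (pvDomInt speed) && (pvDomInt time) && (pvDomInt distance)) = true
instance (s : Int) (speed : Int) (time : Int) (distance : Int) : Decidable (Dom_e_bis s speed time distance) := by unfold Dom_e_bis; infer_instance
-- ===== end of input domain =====

-- B replaces A's single-chain recursion by an explicit iterative loop with a running-maximum accumulator; same cost, different decomposition.


-- termination helper: |d.tdiv 2| < |d| for d ≠ 0 (cited by both ports' decreasing_by)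
theorem pvHalfLt (d : Int) (h : d ≠ 0) : (d.tdiv 2).natAbs < d.natAbs := by
  rw [Int.natAbs_tdiv]
  exact Nat.div_lt_self (Int.natAbs_pos.mpr h) one_lt_two

-- ===== PORT A =====
-- int((speed - s)/2) is exact truncation toward zero on the domain (|diff| ≤ 2^32 fits a float): ported as Int.tdiv
def e_bis (s : Int) (speed : Int) (time : Int) (distance : Int) : Int :=
  if s = speed then s
  else
    let done_distance := (time - speed) * speed
    let mv :=
      if done_distance > distance then
        e_bis speed (speed + (speed - s).tdiv 2) time distance
      else
        e_bis s (s + (speed - s).tdiv 2) time distance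
    max speed mv
termination_by (speed - s).natAbs
decreasing_by
  · simpa using pvHalfLt (speed - s) (by omega)
  · simpa using pvHalfLt (speed - s) (by omega)

-- ===== PORT B =====
-- the while-loop of Source B: state (s, speed) and the running maximum `best : Option Int` (None before the first iteration)
def e_bis_loop (s : Int) (speed : Int) (time : Int) (distance : Int) (best : Option Int) : Int :=
  if s = speed then
    match best with
    | none => s
    | some m => max m s
  else
    let best' : Option Int := some (match best with | none => speed | some m => max m speed)
    let half := (speed - s).tdiv 2
    if (time - speed) * speed > distance then
      e_bis_loop speed (speed + half) time distance best'
    else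
      e_bis_loop s (s + half) time distance best'
termination_by (speed - s).natAbs
decreasing_by
  · simpa using pvHalfLt (speed - s) (by omega)
  · simpa using pvHalfLt (speed - s) (by omega)

def e_bis_alt (s : Int) (speed : Int) (time : Int) (distance : Int) : Int :=
  e_bis_loop s speed time distance none

-- ===== PRECONDITION & SPEC =====
def Spec_e_bis (s : Int) (speed : Int) (time : Int) (distance : Int) (out : Int) : Prop := out = e_bis_alt s speed time distance
instance (s : Int) (speed : Int) (time : Int) (distance : Int) (out : Int) : Decidable (Spec_e_bis s speed time distance out) := by unfold Spec_e_bis; infer_instance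

-- ===== CLAIM (what is proved, stated in full; the proofs are below) =====
def Claim_equal_e_bis : Prop := ∀ (s : Int) (speed : Int) (time : Int) (distance : Int), Dom_e_bis s speed time distance → Spec_e_bis s speed time distance (e_bis s speed time distance)

-- ===== LEMMAS AND PROOFS =====

-- the loop with accumulator `some m` computes max m (e_bis …); with `none` it computes e_bis itself
theorem e_bis_loop_eq (s speed time distance : Int) :
    (∀ m : Int, e_bis_loop s speed time distance (some m) = max m (e_bis s speed time distance)) ∧
    e_bis_loop s speed time distance none = e_bis s speed time distance := by
  induction s, speed using e_bis.induct time distance with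
  | case1 speed =>
    constructor
    · intro m; rw [e_bis_loop, e_bis]; simp
    · rw [e_bis_loop, e_bis]; simp
  | case2 s speed h ih1 ih2 =>
    constructor
    · intro m
      rw [e_bis_loop, e_bis]
      by_cases hc : (time - speed) * speed > distance
      · simp [h, hc, ih1.1, max_assoc]
      · simp [h, hc, ih2.1, max_assoc]
    · rw [e_bis_loop, e_bis]
      by_cases hc : (time - speed) * speed > distance
      · simp [h, hc, ih1.1]
      · simp [h, hc, ih2.1]

-- ===== VERDICT (by name: the statement is the Claim_ definition above) =====
theorem e_bis_spec : Claim_equal_e_bis := by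
  intro s speed time distance _
  unfold Spec_e_bis e_bis_alt
  exact ((e_bis_loop_eq s speed time distance).2).symm
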